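-- pv_equiv track=rewrite | github.com/MikeLeon2810/Manejo-de-Datos | Práctica 2/funciones.py | generar_reporte
-- ===== SOURCE A (Python) =====
-- def boyer_moore(texto, patron):
--     m = len(patron)
--     n = len(texto)
--
--     if m == 0:
--         return 0
--
--     # Tabla last: última ocurrencia de cada carácter en el patrón
--     last = {}
--     for j in range(m):
--         last[patron[j]] = j
--
--     i = m - 1  # índice en el texto
--     k = m - 1  # índice en el patrón
--
--     while i < n:
--         if patron[k] == texto[i]:
--             if k == 0:
--                 return i  # encontrado
--             k -= 1
--             i -= 1
--         else:
--             j = last.get(texto[i], -1)  # -1 si no está en el patrón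
--             i = i + m - min(k, j + 1)   # salto correcto
--             k = m - 1  # reiniciar índice del patrón
--
--     return -1
--
-- def generar_reporte(lista):
--     implicados = set()
--
--     for linea in lista:
--         partes = linea.split("|")
--
--         if len(partes) < 2:
--             continue
--
--         nombre = partes[0].strip()
--         comentario = partes[1].strip().lower()
--
--         r = boyer_moore(comentario, "plagio")
--
--         if r != -1:
--             implicados.add(nombre)  # no permite repetidos
--
--     return sorted(implicados)
-- ===== SOURCE B (Python) =====
-- def generar_reporte(lista):
--     # Stage 1: collect the flagged names WITH duplicates (plain list, no set).
--     nombres = []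
--     for linea in lista:
--         partes = linea.split("|")
--         if len(partes) < 2:
--             continue
--         nombre = partes[0].strip()
--         comentario = partes[1].strip().lower()
--         if "plagio" in comentario:
--             nombres.append(nombre)
--     # Stage 2: sort, then deduplicate by scanning adjacent entries
--     # (equal names are adjacent after sorting), instead of hashing into a set.
--     nombres.sort()
--     reporte = []
--     for n in nombres:
--         if not reporte or reporte[-1] != n:
--             reporte.append(n)
--     return reporte
-- ===== Notes on version B (the rewrite author's own statement) =====
-- stated objective: alternative
-- what changed: Deduplication by hashing into a set followed by sorted() is replaced by a sort-then-adjacent-scan: B collects the flagged names into a plain list with duplicates, sorts it, and removes duplicates by comparing each element with the last one kept; the hand-rolled Boyer-Moore search is replaced by the built-in substring test.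
import Mathlib
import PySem

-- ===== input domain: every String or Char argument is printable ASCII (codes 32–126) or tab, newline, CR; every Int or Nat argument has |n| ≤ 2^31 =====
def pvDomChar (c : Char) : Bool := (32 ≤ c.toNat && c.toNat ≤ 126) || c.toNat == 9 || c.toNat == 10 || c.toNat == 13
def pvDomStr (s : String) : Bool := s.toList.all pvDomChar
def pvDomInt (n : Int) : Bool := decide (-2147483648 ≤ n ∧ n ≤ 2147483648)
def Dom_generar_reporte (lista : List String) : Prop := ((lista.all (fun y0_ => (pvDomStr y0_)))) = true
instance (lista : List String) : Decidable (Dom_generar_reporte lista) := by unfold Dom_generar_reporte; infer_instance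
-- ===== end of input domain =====

-- B replaces A's set-hashing dedup + final sorted() by collecting the flagged names into a
-- plain list with duplicates, sorting it and removing duplicates by an adjacent scan, and A's
-- hand-rolled Boyer-Moore search by the built-in substring test (objective: alternative;
-- same asymptotic cost).

-- ===== PORT A =====
-- Boyer-Moore loop (bad-character rule), literal port of A's while loop.
-- k is the pattern index (Python keeps it an int; it is always a natural number: it starts at
-- m-1, is only decremented when nonzero, and is reset to m-1). fuel is only a structural
-- totality guard: the caller passes (n+1)*(m+1), which exceeds the loop's step count
-- (the window start strictly grows every at most m steps), so the 0-case is never reached.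
def bmLoop (t p : List Char) (last : PySem.Dict Char Int) : Nat → Int → Nat → Int
  | 0, _, _ => -1
  | fuel + 1, i, k =>
    if i < PySem.List.len t then
      if PySem.List.pyGetD p (k : Int) ' ' == PySem.List.pyGetD t i ' ' then
        if k == 0 then i
        else bmLoop t p last fuel (i - 1) (k - 1)
      else
        let j := PySem.Dict.getD last (PySem.List.pyGetD t i ' ') (-1)
        bmLoop t p last fuel (i + PySem.List.len p - min (k : Int) (j + 1)) (p.length - 1)
    else -1

def boyer_moore (texto patron : String) : Int :=
  let p := patron.toList
  if p.length = 0 then 0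
  else
    -- last[patron[j]] = j for j in range(m)
    let last := (PySem.List.pyRange 0 (p.length : Int) 1).foldl
      (fun d j => PySem.Dict.insert d (PySem.List.pyGetD p j ' ') j) PySem.Dict.empty
    bmLoop texto.toList p last ((texto.toList.length + 1) * (p.length + 1))
      ((p.length : Int) - 1) (p.length - 1)

def generar_reporte (lista : List String) : List String :=
  let implicados := lista.foldl (fun s linea =>
    let partes := (PySem.Str.split? linea "|").getD []
    if partes.length < 2 then s
    else
      let nombre := PySem.Str.strip (PySem.List.pyGetD partes 0 "")
      let comentario := PySem.Str.lower (PySem.Str.strip (PySem.List.pyGetD partes 1 ""))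
      if boyer_moore comentario "plagio" ≠ -1 then PySem.Set.add s nombre else s)
    PySem.Set.empty
  PySem.List.sorted implicados (fun x => x) false

-- ===== PORT B =====
-- B: stage 1 collects the flagged names into a plain list (with duplicates) using the
-- built-in substring test; stage 2 sorts that list and removes duplicates by comparing
-- each element against the last one kept (reporte[-1]).
def generar_reporte_alt (lista : List String) : List String :=
  let nombres := lista.foldl (fun acc linea =>
    let partes := (PySem.Str.split? linea "|").getD []
    if partes.length < 2 then acc
    else
      let nombre := PySem.Str.strip (PySem.List.pyGetD partes 0 "")
      let comentario := PySem.Str.lower (PySem.Str.strip (PySem.List.pyGetD partes 1 ""))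
      if PySem.Str.isIn "plagio" comentario then acc ++ [nombre] else acc) []
  let nombresSorted := PySem.List.sorted nombres (fun x => x) false
  nombresSorted.foldl (fun reporte n =>
    if reporte = [] ∨ reporte.getLast? ≠ some n then reporte ++ [n] else reporte) []

-- ===== PRECONDITION & SPEC =====
def Spec_generar_reporte (lista : List String) (out : List String) : Prop := out = generar_reporte_alt lista
instance (lista : List String) (out : List String) : Decidable (Spec_generar_reporte lista out) := by unfold Spec_generar_reporte; infer_instance

-- ===== CLAIM (what is proved, stated in full; the proofs are below) =====
def Claim_equal_generar_reporte : Prop := ∀ (lista : List String), Dom_generar_reporte lista → Spec_generar_reporte lista (generar_reporte lista)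

-- ===== LEMMAS AND PROOFS =====

-- occurrence at s from a complete pointwise match
theorem prefix_of_pointwise (t p : List Char) (s : Nat) (hlen : s + p.length ≤ t.length)
    (h : ∀ tt : Nat, (htt : tt < p.length) → t[s + tt]'(by omega) = p[tt]) :
    p <+: t.drop s := by
  rw [List.prefix_iff_eq_take]
  apply List.ext_getElem
  · simp; omega
  · intro i h1 h2
    have h3 : i < p.length := h1
    rw [List.getElem_take, List.getElem_drop]
    exact (h i h3).symm

-- pointwise consequences of an occurrence at s
theorem pointwise_of_prefix {t p : List Char} {s : Nat} (hp : p ≠ []) (h : p <+: t.drop s) :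
    s + p.length ≤ t.length ∧ ∀ tt : Nat, (htt : tt < p.length) → t[s + tt]'(by
      have := h.length_le; simp at this; omega) = p[tt] := by
  have hl := h.length_le
  simp at hl
  have hm : 1 ≤ p.length := List.length_pos_iff.mpr hp
  refine ⟨by omega, fun tt htt => ?_⟩
  have := h.getElem htt
  rw [List.getElem_drop] at this
  exact this.symm

-- measure helper for the shift branch of bmLoop_correct
theorem bm_measure_lt2 {n s s' m k : Nat} (hm : 1 ≤ m) (hsn : s < n) (hss : s < s') :
    (n - s') * m + (m - 1) < (n - s) * m + k := by
  have h3 : n - s' + 1 ≤ n - s := by omega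
  have h4 : (n - s' + 1) * m ≤ (n - s) * m := Nat.mul_le_mul_right _ h3
  have h5 : (n - s' + 1) * m = (n - s') * m + m := by ring
  rw [h5] at h4
  generalize (n - s') * m = x at *
  generalize (n - s) * m = y at *
  omega

-- main invariant lemma for A's Boyer-Moore loop: at window start s with pattern index k,
-- if positions (k, m) of the window already match and no occurrence starts before s,
-- the loop returns -1 exactly when the pattern occurs nowhere in the text.
theorem bmLoop_correct (t p : List Char) (last : PySem.Dict Char Int) (hp : p ≠ [])
    (hlast : ∀ (c : Char) (idx : Nat) (h1 : idx < p.length), p[idx] = c →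
      (idx : Int) ≤ PySem.Dict.getD last c (-1))
    (hlast2 : ∀ c : Char, -1 ≤ PySem.Dict.getD last c (-1)) :
    ∀ (μ fuel s k : Nat), (t.length - s) * p.length + k = μ → μ < fuel → k < p.length →
    (∀ tt : Nat, k < tt → (h2 : tt < p.length) → ∃ hb : s + tt < t.length, t[s + tt] = p[tt]) →
    (∀ s' : Nat, s' < s → ¬ p <+: t.drop s') →
    (bmLoop t p last fuel ((s : Int) + (k : Int)) k ≠ -1 ↔ ∃ j : Nat, p <+: t.drop j) := by
  intro μ
  induction μ using Nat.strong_induction_on with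
  | _ μ ih =>
  intro fuel s k hμ hfuel hk hpart hno
  have hm : 1 ≤ p.length := List.length_pos_iff.mpr hp
  obtain ⟨f, rfl⟩ : ∃ f, fuel = f + 1 := ⟨fuel - 1, by omega⟩
  have hik : ((s : Int) + (k : Int)) = ((s + k : Nat) : Int) := by push_cast; ring
  rw [hik, bmLoop]
  simp only [PySem.List.len_eq, PySem.List.pyGetD_natCast]
  by_cases hin : s + k < t.length
  · rw [if_pos (by exact_mod_cast hin)]
    rw [List.getD_eq_getElem p ' ' hk, List.getD_eq_getElem t ' ' hin]
    by_cases hmatch : p[k] = t[s + k]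
    · rw [if_pos (by simpa using hmatch)]
      by_cases hk0 : k = 0
      · subst hk0
        rw [if_pos (by simp)]
        have hlen : s + p.length ≤ t.length := by
          rcases Nat.lt_or_ge 1 p.length with h | h
          · obtain ⟨hb, _⟩ := hpart (p.length - 1) (by omega) (by omega)
            omega
          · omega
        constructor
        · intro _
          refine ⟨s, prefix_of_pointwise t p s hlen ?_⟩
          intro tt htt
          rcases Nat.eq_zero_or_pos tt with h0 | h0
          · subst h0; simpa using hmatch.symm
          · obtain ⟨hb, he⟩ := hpart tt (by omega) htt
            exact he
        · intro _
          omega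
      · rw [if_neg (by simpa using hk0)]
        have hidx : ((s + k : Nat) : Int) - 1 = (s : Int) + ((k - 1 : Nat) : Int) := by omega
        rw [hidx]
        refine ih ((t.length - s) * p.length + (k - 1)) ?_ f s (k - 1) rfl ?_ (by omega) ?_ hno
        · subst hμ
          exact Nat.add_lt_add_left (by omega) _
        · have h7 : (t.length - s) * p.length + (k - 1) < (t.length - s) * p.length + k :=
            Nat.add_lt_add_left (by omega) _
          omega
        · intro tt h1 h2
          rcases Nat.lt_or_ge k tt with h3 | h3
          · exact hpart tt h3 h2
          · have h4 : tt = k := by omega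
            subst h4
            exact ⟨hin, hmatch.symm⟩
    · rw [if_neg (by simpa using hmatch)]
      have hjlb := hlast2 (t[s + k])
      set jv : Int := PySem.Dict.getD last (t[s + k]) (-1) with hjv
      have hmin : min ((k : Nat) : Int) (jv + 1) ≤ (k : Int) := min_le_left _ _
      have hmin0 : 0 ≤ min ((k : Nat) : Int) (jv + 1) := by omega
      set S : Int := (s : Int) + (k : Int) + 1 - min ((k : Nat) : Int) (jv + 1) with hS
      have hSpos : (s : Int) + 1 ≤ S := by omega
      have hidx : ((s + k : Nat) : Int) + (p.length : Int) - min ((k : Nat) : Int) (jv + 1)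
          = ((S.toNat : Nat) : Int) + ((p.length - 1 : Nat) : Int) := by omega
      rw [hidx]
      refine ih ((t.length - S.toNat) * p.length + (p.length - 1)) ?_ f S.toNat (p.length - 1) rfl
        ?_ (by omega) (by intro tt h1 h2; omega) ?_
      · subst hμ
        exact bm_measure_lt2 hm (by omega) (by omega)
      · have h7 : (t.length - S.toNat) * p.length + (p.length - 1) < (t.length - s) * p.length + k :=
          bm_measure_lt2 hm (by omega) (by omega)
        omega
      · -- no occurrence before the new window start
        intro s'' hs'' hocc
        obtain ⟨hlen2, hpt⟩ := pointwise_of_prefix hp hocc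
        rcases Nat.lt_or_ge s'' s with hlt | hge
        · exact hno s'' hlt hocc
        · rcases Nat.eq_or_lt_of_le hge with heq | hgt
          · subst heq
            exact hmatch ((hpt k hk).symm)
          · have hS2 : (s'' : Int) < S := by omega
            have hle : s'' ≤ s + k := by omega
            have hidx2 : s + k - s'' < k := by omega
            have hidx3 : s'' + (s + k - s'') = s + k := by omega
            have he : p[s + k - s''] = t[s + k] := by
              have h6 := hpt (s + k - s'') (by omega)
              simp only [hidx3] at h6
              exact h6.symm
            have hub := hlast (t[s + k]) (s + k - s'') (by omega) he
            rw [← hjv] at hub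
            omega
  · rw [if_neg (by exact_mod_cast hin)]
    simp only [ne_eq, not_true_eq_false, false_iff, not_exists]
    intro j hocc
    obtain ⟨hlen2, _⟩ := pointwise_of_prefix hp hocc
    rcases Nat.lt_or_ge j s with hlt | hge
    · exact hno j hlt hocc
    · omega

-- the bad-character table A builds for the pattern "plagio"
def lastPlagio : PySem.Dict Char Int :=
  ((((((PySem.Dict.empty.insert 'p' (0 : Int)).insert 'l' 1).insert 'a' 2).insert 'g' 3).insert 'i' 4).insert 'o' 5)

theorem lastPlagio_ub : ∀ (c : Char) (idx : Nat) (h1 : idx < "plagio".toList.length),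
    ("plagio".toList)[idx] = c → (idx : Int) ≤ PySem.Dict.getD lastPlagio c (-1) := by
  intro c idx h1 h2
  have h6 : idx < 6 := by simpa using h1
  interval_cases idx <;> (simp at h2; subst h2; decide)

theorem lastPlagio_lb : ∀ c : Char, -1 ≤ PySem.Dict.getD lastPlagio c (-1) := by
  intro c
  unfold lastPlagio
  simp only [PySem.Dict.getD_eq_get?_getD, PySem.Dict.get?_insert, PySem.Dict.get?_empty]
  split_ifs <;> simp

-- A's search decides exactly substring containment of "plagio"
theorem boyer_moore_plagio (com : String) :
    (boyer_moore com "plagio" ≠ -1) ↔ PySem.Str.isIn "plagio" com = true := by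
  have hne : "plagio".toList ≠ [] := by decide
  have hd : ("plagio".toList.length = 0) = False := by decide
  have hlen6 : "plagio".toList.length = 6 := by decide
  rw [boyer_moore]
  simp only [hd, if_false]
  have hdict : (PySem.List.pyRange 0 ("plagio".toList.length : Int) 1).foldl
      (fun d j => PySem.Dict.insert d (PySem.List.pyGetD "plagio".toList j ' ') j) PySem.Dict.empty
      = lastPlagio := by
    decide
  rw [hdict]
  have hcast : (("plagio".toList.length : Int) - 1)
      = ((0 : Nat) : Int) + (("plagio".toList.length - 1 : Nat) : Int) := by decide
  rw [hcast]
  rw [bmLoop_correct com.toList "plagio".toList lastPlagio hne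
    lastPlagio_ub lastPlagio_lb
    ((com.toList.length - 0) * "plagio".toList.length + ("plagio".toList.length - 1))
    ((com.toList.length + 1) * ("plagio".toList.length + 1))
    0 ("plagio".toList.length - 1) rfl
    (by rw [hlen6]; have h8 : (com.toList.length + 1) * (6 + 1) = 7 * com.toList.length + 7 := by ring
        have h9 : (com.toList.length - 0) * 6 = 6 * com.toList.length := by ring_nf; omega
        omega)
    (by decide)
    (by intro tt h1 h2; rw [hlen6] at h1 h2; omega)
    (by intro s' h1; omega)]
  rw [show PySem.Str.isIn "plagio" com = PySem.Chars.isIn "plagio".toList com.toList from by simp]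
  exact PySem.Chars.exists_prefix_drop_iff_isIn _ _

-- the per-line extraction both loops perform, as one function
def lineName (linea : String) : Option String :=
  let partes := (PySem.Str.split? linea "|").getD []
  if 2 ≤ partes.length ∧
      PySem.Str.isIn "plagio" (PySem.Str.lower (PySem.Str.strip (PySem.List.pyGetD partes 1 ""))) = true then
    some (PySem.Str.strip (PySem.List.pyGetD partes 0 ""))
  else none

-- A's loop accumulates exactly the set of extracted names
theorem fold_A (lista : List String) (s : PySem.Set String) :
    lista.foldl (fun s linea =>
      let partes := (PySem.Str.split? linea "|").getD []
      if partes.length < 2 then s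
      else
        let nombre := PySem.Str.strip (PySem.List.pyGetD partes 0 "")
        let comentario := PySem.Str.lower (PySem.Str.strip (PySem.List.pyGetD partes 1 ""))
        if boyer_moore comentario "plagio" ≠ -1 then PySem.Set.add s nombre else s) s
    = (lista.filterMap lineName).foldl PySem.Set.add s := by
  induction lista generalizing s with
  | nil => rfl
  | cons linea rest ihr =>
    simp only [List.foldl_cons, List.filterMap_cons]
    by_cases h1 : ((PySem.Str.split? linea "|").getD []).length < 2
    · rw [if_pos h1, show lineName linea = none from by
        unfold lineName; rw [if_neg (by intro hc; exact absurd hc.1 (by omega))]]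
      exact ihr s
    · rw [if_neg h1]
      by_cases h2 : boyer_moore (PySem.Str.lower (PySem.Str.strip
          (PySem.List.pyGetD ((PySem.Str.split? linea "|").getD []) 1 ""))) "plagio" ≠ -1
      · rw [if_pos h2, show lineName linea
            = some (PySem.Str.strip (PySem.List.pyGetD ((PySem.Str.split? linea "|").getD []) 0 "")) from by
          unfold lineName; rw [if_pos ⟨by omega, (boyer_moore_plagio _).mp h2⟩]]
        simp only [List.foldl_cons]
        exact ihr _
      · rw [if_neg h2, show lineName linea = none from by
          unfold lineName; rw [if_neg (by intro hc; exact h2 ((boyer_moore_plagio _).mpr hc.2))]]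
        exact ihr s

-- B's first loop collects exactly the extracted names, in order, with duplicates
theorem fold_B_names (lista : List String) (acc : List String) :
    lista.foldl (fun acc linea =>
      let partes := (PySem.Str.split? linea "|").getD []
      if partes.length < 2 then acc
      else
        let nombre := PySem.Str.strip (PySem.List.pyGetD partes 0 "")
        let comentario := PySem.Str.lower (PySem.Str.strip (PySem.List.pyGetD partes 1 ""))
        if PySem.Str.isIn "plagio" comentario then acc ++ [nombre] else acc) acc
    = acc ++ lista.filterMap lineName := by
  induction lista generalizing acc with
  | nil => simp
  | cons linea rest ihr =>
    simp only [List.foldl_cons, List.filterMap_cons]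
    by_cases h1 : ((PySem.Str.split? linea "|").getD []).length < 2
    · rw [if_pos h1, show lineName linea = none from by
        unfold lineName; rw [if_neg (by intro hc; exact absurd hc.1 (by omega))]]
      exact ihr acc
    · rw [if_neg h1]
      by_cases h2 : PySem.Str.isIn "plagio" (PySem.Str.lower (PySem.Str.strip
          (PySem.List.pyGetD ((PySem.Str.split? linea "|").getD []) 1 ""))) = true
      · rw [if_pos h2, show lineName linea
            = some (PySem.Str.strip (PySem.List.pyGetD ((PySem.Str.split? linea "|").getD []) 0 "")) from by
          unfold lineName; rw [if_pos ⟨by omega, h2⟩]]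
        rw [ihr]
        simp
      · rw [if_neg h2, show lineName linea = none from by
          unfold lineName; rw [if_neg (by intro hc; exact h2 hc.2)]]
        exact ihr acc

-- B's second loop as a structural recursion over the sorted list, carrying the last kept element
def dedupRec : Option String → List String → List String
  | _, [] => []
  | o, y :: ys => if o = some y then dedupRec o ys else y :: dedupRec (some y) ys

-- B's foldl dedup loop equals dedupRec driven by the accumulator's last element
theorem foldl_dedup (ys : List String) (acc : List String) :
    ys.foldl (fun reporte n =>
      if reporte = [] ∨ reporte.getLast? ≠ some n then reporte ++ [n] else reporte) acc
    = acc ++ dedupRec acc.getLast? ys := by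
  induction ys generalizing acc with
  | nil => simp [dedupRec]
  | cons y ys ihr =>
    simp only [List.foldl_cons, dedupRec]
    by_cases h : acc.getLast? = some y
    · have hne : acc ≠ [] := by intro he; rw [he] at h; simp at h
      rw [if_neg (by simp [hne, h]), if_pos h]
      rw [ihr, h]
    · rw [if_pos (by right; exact h), if_neg h]
      rw [ihr]
      simp

-- on a ≤-sorted list all of whose elements are ≥ the carried bound, dedupRec returns a
-- strictly increasing list containing exactly the elements other than the bound
theorem dedupRec_spec (ys : List String) (hys : ys.Pairwise (fun a b => a ≤ b)) :
    ∀ o : Option String, (∀ a, o = some a → ∀ y ∈ ys, a ≤ y) →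
      (dedupRec o ys).Pairwise (fun a b => a < b) ∧
      (∀ x, x ∈ dedupRec o ys ↔ (x ∈ ys ∧ o ≠ some x)) := by
  induction ys with
  | nil => intro o _; exact ⟨List.Pairwise.nil, by simp [dedupRec]⟩
  | cons y ys ihr =>
    intro o ho
    have hy : ∀ z ∈ ys, y ≤ z := (List.pairwise_cons.mp hys).1
    have hys' := (List.pairwise_cons.mp hys).2
    by_cases h : o = some y
    · rw [dedupRec, if_pos h]
      obtain ⟨hpw, hmem⟩ := ihr hys' o (by
        intro a ha z hz
        rw [h] at ha
        cases ha
        exact hy z hz)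
      refine ⟨hpw, fun x => ?_⟩
      rw [hmem, List.mem_cons]
      constructor
      · rintro ⟨h1, h2⟩; exact ⟨Or.inr h1, h2⟩
      · rintro ⟨h1 | h1, h2⟩
        · exact absurd (h1 ▸ h) h2
        · exact ⟨h1, h2⟩
    · rw [dedupRec, if_neg h]
      obtain ⟨hpw, hmem⟩ := ihr hys' (some y) (by
        intro a ha z hz
        cases ha
        exact hy z hz)
      constructor
      · rw [List.pairwise_cons]
        refine ⟨fun z hz => ?_, hpw⟩
        obtain ⟨h1, h2⟩ := (hmem z).mp hz
        exact lt_of_le_of_ne (hy z h1) (by intro he; exact h2 (by rw [he]))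
      · intro x
        rw [List.mem_cons, hmem, List.mem_cons]
        constructor
        · rintro (rfl | ⟨h1, h2⟩)
          · exact ⟨Or.inl rfl, h⟩
          · refine ⟨Or.inr h1, fun he => ?_⟩
            -- o = some x with x ∈ ys forces x = y (o's bound gives x ≤ y, sortedness y ≤ x)
            have hxy : x ≤ y := ho x he y (List.mem_cons_self)
            have hyx : y ≤ x := hy x h1
            exact h (by rw [he, le_antisymm hxy hyx])
        · rintro ⟨rfl | h1, h2⟩
          · exact Or.inl rfl
          · by_cases hxy : x = y
            · exact Or.inl hxy
            · exact Or.inr ⟨h1, fun he => hxy (by injection he.symm)⟩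

-- ===== VERDICT (by name: the statement is the Claim_ definition above) =====
theorem generar_reporte_spec : Claim_equal_generar_reporte := by
  intro lista _
  unfold Spec_generar_reporte generar_reporte generar_reporte_alt
  rw [fold_A, fold_B_names, foldl_dedup]
  simp only [List.nil_append, List.getLast?_nil]
  set names := lista.filterMap lineName with hn
  have hofl : names.foldl PySem.Set.add PySem.Set.empty = PySem.Set.ofList names := rfl
  rw [hofl]
  set ys := PySem.List.sorted names (fun x => x) false with hys
  have hpw : ys.Pairwise (fun a b => a ≤ b) := PySem.List.sorted_pairwise names (fun x => x)
  obtain ⟨hlt, hmem⟩ := dedupRec_spec ys hpw none (by intro a ha; cases ha)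
  have hmem2 : ∀ x, x ∈ dedupRec none ys ↔ x ∈ PySem.Set.ofList names := by
    intro x
    rw [hmem x, PySem.Set.mem_ofList, hys, PySem.List.mem_sorted]
    simp
  have hnd : (dedupRec none ys).Nodup := hlt.imp ne_of_lt
  have hperm : (dedupRec none ys).Perm (PySem.Set.ofList names) :=
    (List.perm_ext_iff_of_nodup hnd (PySem.Set.nodup_ofList names)).mpr hmem2
  exact PySem.List.sorted_eq_of_perm_of_pairwise_lt _ _ _ hperm hlt
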